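-- pv_equiv track=rewrite | github.com/aphoticshaman/HungryOrca | arc_agi_2025_solver.py | p_scale_up
-- ===== SOURCE A (Python) =====
-- K_H = lambda g: len(g)
--
-- K_W = lambda g: len(g[0]) if g else 0
--
-- K_NEW = lambda h, w, v=0: [[v] * w for _ in range(h)]
--
-- def p_scale_up(g, factor):
--     """Payload: Scale grid up by factor"""
--     h, w = K_H(g), K_W(g)
--     n = K_NEW(h * factor, w * factor)
--     for y in range(h):
--         for x in range(w):
--             for dy in range(factor):
--                 for dx in range(factor):
--                     n[y * factor + dy][x * factor + dx] = g[y][x]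
--     return n
-- ===== SOURCE B (Python) =====
-- def p_scale_up(g, factor):
--     """Payload: Scale grid up by factor"""
--     w = len(g[0]) if g else 0
--     out = []
--     for row in g:
--         expanded = [v for v in row[:w] for _ in range(factor)]
--         for _ in range(factor):
--             out.append(list(expanded))
--     return out
-- ===== Notes on version B (the rewrite author's own statement) =====
-- stated objective: simpler
-- what changed: B builds each output row once by horizontally expanding the first-row-width prefix of an input row and appends factor independent copies of it, instead of A's preallocated zero grid filled cell-by-cell by a quadruple index loop; replicating whole rows by list copy instead of per-cell index assignment is also a measurable constant-factor speedup.
import Mathlib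
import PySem

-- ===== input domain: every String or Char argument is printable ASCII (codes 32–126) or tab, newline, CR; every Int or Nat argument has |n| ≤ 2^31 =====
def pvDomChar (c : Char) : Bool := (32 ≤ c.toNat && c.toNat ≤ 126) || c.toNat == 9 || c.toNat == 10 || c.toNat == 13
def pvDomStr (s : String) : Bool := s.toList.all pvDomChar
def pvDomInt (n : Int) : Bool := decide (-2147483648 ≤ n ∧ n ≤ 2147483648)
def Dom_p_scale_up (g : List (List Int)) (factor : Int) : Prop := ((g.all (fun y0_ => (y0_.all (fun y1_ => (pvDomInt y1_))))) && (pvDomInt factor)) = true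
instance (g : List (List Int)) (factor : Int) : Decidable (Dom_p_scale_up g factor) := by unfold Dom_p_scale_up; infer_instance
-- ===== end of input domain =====

-- B builds each output row once by horizontally expanding the first-row-width prefix of an
-- input row and appends factor independent copies of it, instead of A's preallocated zero
-- grid filled cell-by-cell by a quadruple index loop (objective: simpler).

-- ===== PORT A =====
def p_scale_up (g : List (List Int)) (factor : Int) : List (List Int) :=
  let h : Int := g.length
  let w : Int := if g = [] then (0 : Int) else ((g.headD []).length : Int)
  let n0 : List (List Int) :=
    (PySem.List.pyRange 0 (h * factor) 1).map (fun _ => List.replicate (w * factor).toNat (0 : Int))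
  (PySem.List.pyRange 0 h 1).foldl
    (fun n y =>
      (PySem.List.pyRange 0 w 1).foldl
        (fun n x =>
          (PySem.List.pyRange 0 factor 1).foldl
            (fun n dy =>
              (PySem.List.pyRange 0 factor 1).foldl
                (fun n dx =>
                  PySem.List.pySetD n (y * factor + dy)
                    (PySem.List.pySetD (PySem.List.pyGetD n (y * factor + dy) [])
                      (x * factor + dx)
                      (PySem.List.pyGetD (PySem.List.pyGetD g y []) x 0)))
                n)
            n)
        n)
    n0

-- ===== PORT B =====
def p_scale_up_alt (g : List (List Int)) (factor : Int) : List (List Int) :=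
  let w : Int := if g = [] then (0 : Int) else ((g.headD []).length : Int)
  g.foldl
    (fun out row =>
      let expanded := (PySem.List.slice row none (some w)).flatMap (fun v => List.replicate factor.toNat v)
      out ++ List.replicate factor.toNat expanded)
    []

-- ===== PRECONDITION & SPEC =====
-- Pre_ excludes exactly the inputs on which A raises IndexError: a positive factor together
-- with a row shorter than the first row (A reads the first len(g[0]) cells of every row).
def Pre_p_scale_up (g : List (List Int)) (factor : Int) : Prop :=
  0 < factor → ∀ r ∈ g, (g.headD []).length ≤ r.length
instance (g : List (List Int)) (factor : Int) : Decidable (Pre_p_scale_up g factor) := by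
  unfold Pre_p_scale_up; infer_instance
def pvWitness_p_scale_up : List (List Int) × Int := ([[1, 2], [3, 4]], 2)

def Spec_p_scale_up (g : List (List Int)) (factor : Int) (out : List (List Int)) : Prop := out = p_scale_up_alt g factor
instance (g : List (List Int)) (factor : Int) (out : List (List Int)) : Decidable (Spec_p_scale_up g factor out) := by unfold Spec_p_scale_up; infer_instance

-- ===== CLAIM (what is proved, stated in full; the proofs are below) =====
def Claim_equal_p_scale_up : Prop := ∀ (g : List (List Int)) (factor : Int), Dom_p_scale_up g factor → Pre_p_scale_up g factor → Spec_p_scale_up g factor (p_scale_up g factor)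

-- ===== LEMMAS AND PROOFS =====

def pvE (f : Nat) (r : List Int) : List Int := r.flatMap (fun v => List.replicate f v)

theorem pvE_nil (f : Nat) : pvE f [] = [] := rfl

theorem pvE_length (f : Nat) (r : List Int) : (pvE f r).length = r.length * f := by
  induction r with
  | nil => simp [pvE]
  | cons v t ih => simp only [pvE, List.flatMap_cons, List.length_append, List.length_replicate, List.length_cons] at ih ⊢; rw [ih]; ring

theorem pv_set_append {β : Type} (a b : List β) (n : Nat) (v : β) :
    (a ++ b).set (a.length + n) v = a ++ b.set n v := by
  induction a with
  | nil => simp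
  | cons x t ih => simpa [Nat.succ_add] using ih

theorem pv_getD_append {β : Type} (a b : List β) (d : β) :
    (a ++ b).getD a.length d = b.getD 0 d := by
  induction a with
  | nil => rfl
  | cons x t ih => simpa using ih

theorem pv_setrun (v : Int) :
    ∀ (k : Nat) (pre suf : List Int),
      (List.range' pre.length k).foldl (fun row j => row.set j v)
          (pre ++ List.replicate k (0 : Int) ++ suf)
        = pre ++ List.replicate k v ++ suf := by
  intro k
  induction k with
  | zero => intro pre suf; simp
  | succ k ih =>
    intro pre suf
    rw [List.range'_succ, List.foldl_cons]
    have h1 : (pre ++ List.replicate (k+1) (0:Int) ++ suf).set pre.length v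
        = (pre ++ [v]) ++ List.replicate k (0:Int) ++ suf := by
      rw [List.append_assoc, show pre.length = pre.length + 0 from rfl, pv_set_append]
      simp [List.replicate_succ]
    rw [h1]
    have h2 := ih (pre ++ [v]) suf
    simp only [List.length_append, List.length_cons, List.length_nil] at h2 ⊢
    rw [show pre.length + 1 = pre.length + (0+1) from rfl] at h2
    simp only [Nat.zero_add] at h2
    rw [h2]
    simp [List.replicate_succ]

theorem pv_fold_set_row {β α : Type} (d : β) (ρ : β → α → β) (l : List α) :
    ∀ (n : List β) (i : Nat), i < n.length →
      l.foldl (fun n a => n.set i (ρ (n.getD i d) a)) n = n.set i (l.foldl ρ (n.getD i d)) := by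
  induction l with
  | nil =>
    intro n i hi
    simp only [List.foldl_nil, List.getD]
    rw [List.getElem?_eq_getElem hi]
    simp [List.set_getElem_self]
  | cons a l ih =>
    intro n i hi
    simp only [List.foldl_cons]
    rw [ih _ i (by simpa using hi)]
    rw [List.set_set]
    congr 2
    simp [List.getD, hi]

theorem pv_dyPhi {β α : Type} (d : β) (ρ : β → α → β) (l : List α) :
    ∀ (mid : List β) (k : Nat) (pre suf : List β), mid.length = k →
      (List.range' pre.length k).foldl
          (fun n j => l.foldl (fun n a => n.set j (ρ (n.getD j d) a)) n)
          (pre ++ mid ++ suf)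
        = pre ++ mid.map (fun m => l.foldl ρ m) ++ suf := by
  intro mid
  induction mid with
  | nil => intro k pre suf hk; subst hk; simp
  | cons m rest ih =>
    intro k pre suf hk
    subst hk
    simp only [List.length_cons, List.range'_succ, List.foldl_cons]
    have hlen : pre.length < (pre ++ (m :: rest) ++ suf).length := by simp
    rw [pv_fold_set_row d ρ l _ pre.length hlen]
    have hget : (pre ++ (m :: rest) ++ suf).getD pre.length d = m := by
      rw [List.append_assoc, pv_getD_append]; rfl
    rw [hget]
    have hset : (pre ++ (m :: rest) ++ suf).set pre.length (l.foldl ρ m)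
        = (pre ++ [l.foldl ρ m]) ++ rest ++ suf := by
      rw [List.append_assoc, show pre.length = pre.length + 0 from rfl, pv_set_append]
      simp
    rw [hset]
    have h2 := ih rest.length (pre ++ [l.foldl ρ m]) suf rfl
    simp only [List.length_append, List.length_cons, List.length_nil] at h2 ⊢
    rw [show pre.length + 1 = pre.length + (0+1) from rfl] at h2
    simp only [Nat.zero_add] at h2
    rw [h2]
    simp

theorem pv_foldl_congr {α β : Type} (l : List α) (F G : β → α → β)
    (h : ∀ a ∈ l, ∀ b, F b a = G b a) : ∀ init, l.foldl F init = l.foldl G init := by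
  induction l with
  | nil => intro init; rfl
  | cons a t ih =>
    intro init
    simp only [List.foldl_cons]
    rw [h a List.mem_cons_self init]
    exact ih (fun x hx b => h x (List.mem_cons_of_mem a hx) b) _

theorem pv_xfold (f : Nat) (r : List Int) (pre suf : List (List Int)) :
    ∀ (rs : List Int) (x₀ : Nat),
      r.drop x₀ = rs →
      (List.range' x₀ rs.length).foldl
          (fun n kx =>
            (List.range' pre.length f).foldl
              (fun n j =>
                (List.range' (kx * f) f).foldl
                  (fun n jx => n.set j ((n.getD j []).set jx (r.getD kx 0))) n)
              n)
          (pre ++ List.replicate f (pvE f (r.take x₀) ++ List.replicate (rs.length * f) 0) ++ suf)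
        = pre ++ List.replicate f (pvE f r) ++ suf := by
  intro rs
  induction rs with
  | nil =>
    intro x₀ hdrop
    have : r.take x₀ = r := List.take_of_length_le (by
      by_contra h
      push_neg at h
      have := List.drop_eq_nil_iff.mp hdrop
      omega)
    simp [this]
  | cons v rs' ih =>
    intro x₀ hdrop
    have hx : x₀ < r.length := by
      by_contra h
      push_neg at h
      rw [List.drop_eq_nil_of_le h] at hdrop
      simp at hdrop
    have hget : r[x₀]? = some v := by
      have h0 : (r.drop x₀)[0]? = some v := by rw [hdrop]; rfl
      rw [List.getElem?_drop] at h0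
      simpa using h0
    have hgetD : r.getD x₀ 0 = v := by simp [List.getD, hget]
    have htake : r.take (x₀ + 1) = r.take x₀ ++ [v] := by
      rw [List.take_succ, hget]; rfl
    have hdrop' : r.drop (x₀ + 1) = rs' := by
      have : r.drop (x₀ + 1) = (r.drop x₀).drop 1 := by rw [List.drop_drop]
      rw [this, hdrop]; rfl
    have hElen : (pvE f (r.take x₀)).length = x₀ * f := by
      rw [pvE_length, List.length_take, min_eq_left (le_of_lt hx)]
    simp only [List.length_cons, List.range'_succ, List.foldl_cons, hgetD]
    -- the first column step
    set cur : List Int := pvE f (r.take x₀) ++ List.replicate ((rs'.length + 1) * f) 0 with hcur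
    have hstep :
        (List.range' pre.length f).foldl
            (fun n j =>
              (List.range' (x₀ * f) f).foldl
                (fun n jx => n.set j ((n.getD j []).set jx v)) n)
            (pre ++ List.replicate f cur ++ suf)
          = pre ++ List.replicate f (pvE f (r.take (x₀ + 1)) ++ List.replicate (rs'.length * f) 0) ++ suf := by
      have hdy := pv_dyPhi ([] : List Int) (fun row jx => row.set jx v)
        (List.range' (x₀ * f) f) (List.replicate f cur) f pre suf (List.length_replicate)
      rw [hdy, List.map_replicate]
      congr 2
      -- Φ cur = pvE f (take (x₀+1)) ++ replicate (rs'.length*f) 0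
      have hsplit : cur = pvE f (r.take x₀) ++ List.replicate f (0:Int) ++ List.replicate (rs'.length * f) 0 := by
        rw [hcur, show (rs'.length + 1) * f = f + rs'.length * f by ring, List.replicate_add, List.append_assoc]
      rw [hsplit]
      have hrun := pv_setrun v f (pvE f (r.take x₀)) (List.replicate (rs'.length * f) 0)
      rw [hElen] at hrun
      rw [hrun, htake, pvE]
      simp [pvE, List.append_assoc]
    rw [hstep]
    exact ih (x₀ + 1) hdrop'

theorem pv_yfold (f : Nat) (g : List (List Int)) (w0 : Nat)
    (hw : ∀ row ∈ g, w0 ≤ row.length) :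
    ∀ (gs : List (List Int)) (y₀ : Nat) (pre : List (List Int)),
      g.drop y₀ = gs → pre.length = y₀ * f →
      (List.range' y₀ gs.length).foldl
          (fun n ky =>
            (List.range' 0 w0).foldl
              (fun n kx =>
                (List.range' (ky * f) f).foldl
                  (fun n j =>
                    (List.range' (kx * f) f).foldl
                      (fun n jx => n.set j ((n.getD j []).set jx ((g.getD ky []).getD kx 0))) n)
                  n)
              n)
          (pre ++ List.replicate (gs.length * f) (List.replicate (w0 * f) (0 : Int)))
        = pre ++ gs.flatMap (fun row => List.replicate f (pvE f (row.take w0))) := by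
  intro gs
  induction gs with
  | nil => intro y₀ pre _ _; simp
  | cons hd rest ih =>
    intro y₀ pre hdrop hp
    have hhd : g.getD y₀ [] = hd := by
      have h0 : (g.drop y₀)[0]? = some hd := by rw [hdrop]; rfl
      rw [List.getElem?_drop] at h0
      have h0' : g[y₀]? = some hd := by simpa using h0
      simp [List.getD, h0']
    have hmem : hd ∈ g := by
      have : hd ∈ g.drop y₀ := by rw [hdrop]; exact List.mem_cons_self
      exact List.mem_of_mem_drop this
    have hlen : w0 ≤ hd.length := hw hd hmem
    have htk : (hd.take w0).length = w0 := by
      rw [List.length_take, min_eq_left hlen]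
    have hdrop' : g.drop (y₀ + 1) = rest := by
      have : g.drop (y₀ + 1) = (g.drop y₀).drop 1 := by rw [List.drop_drop]
      rw [this, hdrop]; rfl
    simp only [List.length_cons, List.range'_succ, List.foldl_cons, hhd]
    have hsplit : List.replicate ((rest.length + 1) * f) (List.replicate (w0 * f) (0:Int))
        = List.replicate f (List.replicate (w0 * f) (0:Int)) ++ List.replicate (rest.length * f) (List.replicate (w0 * f) (0:Int)) := by
      rw [show (rest.length + 1) * f = f + rest.length * f by ring, List.replicate_add]
    rw [hsplit, ← List.append_assoc]
    have hx := pv_xfold f (hd.take w0) pre (List.replicate (rest.length * f) (List.replicate (w0 * f) (0:Int))) (hd.take w0) 0 rfl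
    rw [htk, hp] at hx
    simp only [List.take_zero, pvE_nil, List.nil_append] at hx
    have hcong :
        (List.range' 0 w0).foldl
            (fun n kx =>
              (List.range' (y₀ * f) f).foldl
                (fun n j =>
                  (List.range' (kx * f) f).foldl
                    (fun n jx => n.set j ((n.getD j []).set jx (hd.getD kx 0))) n)
                n)
            (pre ++ List.replicate f (List.replicate (w0 * f) (0:Int)) ++ List.replicate (rest.length * f) (List.replicate (w0 * f) (0:Int)))
          = (List.range' 0 w0).foldl
            (fun n kx =>
              (List.range' (y₀ * f) f).foldl
                (fun n j =>
                  (List.range' (kx * f) f).foldl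
                    (fun n jx => n.set j ((n.getD j []).set jx ((hd.take w0).getD kx 0))) n)
                n)
            (pre ++ List.replicate f (List.replicate (w0 * f) (0:Int)) ++ List.replicate (rest.length * f) (List.replicate (w0 * f) (0:Int))) := by
      apply pv_foldl_congr
      intro kx hkx b
      have hklt : kx < w0 := by
        have := List.mem_range'_1.mp hkx
        omega
      have : (hd.take w0).getD kx 0 = hd.getD kx 0 := by
        simp [List.getD, hklt]
      rw [this]
    rw [hcong, hx]
    have h2 := ih (y₀ + 1) (pre ++ List.replicate f (pvE f (hd.take w0))) hdrop'
      (by simp; rw [hp]; ring)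
    rw [h2]
    simp

theorem pv_foldl_const {α β : Type} (l : List α) (b : β) :
    l.foldl (fun b _ => b) b = b := by
  induction l generalizing b with
  | nil => rfl
  | cons a l ih => simpa using ih b

theorem pv_bridgeN {α : Type} (m : Nat) (φ : α → Int → α) (init : α) :
    (PySem.List.pyRange 0 (m : Int) 1).foldl φ init
      = (List.range m).foldl (fun (a : α) (k : Nat) => φ a (k : Int)) init := by
  rw [PySem.List.pyRange_one, List.foldl_map]
  simp only [Int.sub_zero, Int.toNat_natCast, zero_add]

theorem pv_w (g : List (List Int)) :
    (if g = [] then (0 : Int) else ((g.headD []).length : Int)) = ((g.headD []).length : Int) := by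
  split <;> simp_all

theorem pv_alt_eq (g : List (List Int)) (factor : Int) :
    p_scale_up_alt g factor
      = g.flatMap (fun row =>
          List.replicate factor.toNat (pvE factor.toNat (row.take (g.headD []).length))) := by
  simp only [p_scale_up_alt, pvE, pv_w, PySem.List.slice_to_natCast, Int.toNat_natCast]
  rw [PySem.List.foldl_append_eq_flatMap]
  simp

theorem pv_main (g : List (List Int)) (factor : Int) (hPre : 0 < factor → ∀ r ∈ g, (g.headD []).length ≤ r.length) :
    p_scale_up g factor = p_scale_up_alt g factor := by
  by_cases hpos : 0 < factor
  case neg =>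
    have hneg : factor ≤ 0 := by omega
    have hz : PySem.List.pyRange 0 factor 1 = [] := PySem.List.pyRange_one_eq_nil hneg
    have hz2 : PySem.List.pyRange 0 ((g.length : Int) * factor) 1 = [] :=
      PySem.List.pyRange_one_eq_nil (mul_nonpos_of_nonneg_of_nonpos (by positivity) hneg)
    have ht : factor.toNat = 0 := Int.toNat_of_nonpos hneg
    rw [pv_alt_eq, ht]
    simp only [p_scale_up, pv_w, hz, hz2, List.foldl_nil, List.map_nil, pv_foldl_const,
      List.replicate_zero]
    simp [pv_foldl_const]
  case pos =>
    lift factor to Nat using le_of_lt hpos with f hf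
    rw [pv_alt_eq]
    simp only [Int.toNat_natCast]
    have hy := pv_yfold f g (g.headD []).length (hPre hpos) g 0 [] (by rfl) (by simp)
    simp only [List.nil_append, List.range'_eq_map_range, List.foldl_map, Nat.zero_add] at hy
    rw [← hy]
    simp only [p_scale_up, pv_w]
    simp only [← Nat.cast_mul, pv_bridgeN]
    simp only [← Nat.cast_mul, ← Nat.cast_add, PySem.List.pySetD_natCast, PySem.List.pyGetD_natCast,
      Int.toNat_natCast, List.map_const']
    rw [PySem.List.length_pyRange_one]
    simp only [Int.sub_zero, ← Nat.cast_mul, Int.toNat_natCast]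

-- ===== VERDICT (by name: the statement is the Claim_ definition above) =====
theorem p_scale_up_spec : Claim_equal_p_scale_up := by
  intro g factor _ hPre
  exact pv_main g factor hPre
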